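-- pv_equiv track=rewrite | github.com/tha-hammer/CodeWriter9.0 | sessions/gwt-0041_attempt5.py | _gwt_invariant
-- ===== SOURCE A (Python) =====
-- def _gwt_invariant(order: list[int],
--                    has_sim_traces: bool,
--                    has_api_context: bool,
--                    has_verifiers: bool,
--                    has_tla_spec: bool) -> bool:
--     """
--     TLA+ GWTInvariant: full causal-ordering predicate over the assembled ranks.
--     """
--     if has_sim_traces:
--         if not (len(order) >= 1 and order[0] == 1):
--             return False
--
--     if has_api_context:
--         found = False
--         for i, r in enumerate(order):
--             if r == 2:
--                 if not has_sim_traces or i > 0: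
--                     found = True
--                     break
--         if not found:
--             return False
--
--     if has_verifiers:
--         found = False
--         for i, r in enumerate(order):
--             if r == 3:
--                 if not has_api_context or any(order[j] == 2 for j in range(i)):
--                     found = True
--                     break
--         if not found:
--             return False
--
--     if has_tla_spec:
--         found = False
--         for i, r in enumerate(order):
--             if r == 4:
--                 if not has_verifiers or any(order[j] == 3 for j in range(i)):
--                     found = True
--                     break
--         if not found:
--             return False
--
--     found_5 = False
--     for i, r in enumerate(order):
--         if r == 5:
--             if not has_tla_spec or any(order[j] == 4 for j in range(i)):
--                 found_5 = True
--                 break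
--     return found_5
-- ===== SOURCE B (Python) =====
-- def _gwt_invariant(order: list[int],
--                    has_sim_traces: bool,
--                    has_api_context: bool,
--                    has_verifiers: bool,
--                    has_tla_spec: bool) -> bool:
--     """Single pass: track 'seen prerequisite' flags instead of rescanning the prefix."""
--     if has_sim_traces and not (order and order[0] == 1):
--         return False
--     seen2 = seen3 = seen4 = False
--     f2 = f3 = f4 = f5 = False
--     for i, r in enumerate(order):
--         if r == 2 and (not has_sim_traces or i > 0):
--             f2 = True
--         if r == 3 and (not has_api_context or seen2):
--             f3 = True
--         if r == 4 and (not has_verifiers or seen3):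
--             f4 = True
--         if r == 5 and (not has_tla_spec or seen4):
--             f5 = True
--         if r == 2:
--             seen2 = True
--         if r == 3:
--             seen3 = True
--         if r == 4:
--             seen4 = True
--     return ((not has_api_context or f2) and (not has_verifiers or f3)
--             and (not has_tla_spec or f4) and f5)
-- ===== Notes on version B (the rewrite author's own statement) =====
-- stated objective: alternative
-- what changed: Replaced A's four separate early-exit scans, each rescanning the whole prefix (any(order[j]==k for j in range(i))) at every candidate, by one single pass over the list that carries running 'seen prerequisite' boolean flags; it trades A's early breaks for a single full traversal.
import Mathlib
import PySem

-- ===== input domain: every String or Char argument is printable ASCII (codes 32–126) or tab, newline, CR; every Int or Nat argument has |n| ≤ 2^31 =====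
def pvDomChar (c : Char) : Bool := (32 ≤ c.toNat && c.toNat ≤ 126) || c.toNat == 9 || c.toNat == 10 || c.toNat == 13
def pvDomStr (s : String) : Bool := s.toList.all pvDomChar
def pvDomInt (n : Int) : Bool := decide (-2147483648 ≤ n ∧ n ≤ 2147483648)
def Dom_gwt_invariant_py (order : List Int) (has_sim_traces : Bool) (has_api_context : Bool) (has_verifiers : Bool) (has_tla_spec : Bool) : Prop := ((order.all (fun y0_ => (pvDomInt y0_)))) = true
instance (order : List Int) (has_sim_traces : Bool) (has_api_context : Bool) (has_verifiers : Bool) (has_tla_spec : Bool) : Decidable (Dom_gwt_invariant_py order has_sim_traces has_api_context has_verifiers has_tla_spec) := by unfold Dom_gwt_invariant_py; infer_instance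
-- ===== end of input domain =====

-- B (alternative): one pass over the list carrying running 'seen prerequisite' flags, instead of A's
-- per-block loops that rescan the prefix ('any(order[j]==k for j in range(i))'); return value only.

-- ===== PORT A =====
-- any(order[j] == v for j in range(i))
def pvAnyEq (l : List Int) (i : Nat) (v : Int) : Bool := (l.take i).any (fun x => x == v)

-- the has_api_context loop: first r == 2 with (not has_sim_traces or i > 0)
def pvLoop2 (sim : Bool) : Nat → List Int → Bool
  | _, [] => false
  | i, r :: rest => if r == 2 && (!sim || decide (0 < i)) then true else pvLoop2 sim (i + 1) rest

-- the has_verifiers / has_tla_spec / final loops: first r == target with (not guard or a prereq earlier)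
def pvLoopFind (full : List Int) (target pre : Int) (guard : Bool) : Nat → List Int → Bool
  | _, [] => false
  | i, r :: rest =>
      if r == target && (!guard || pvAnyEq full i pre) then true
      else pvLoopFind full target pre guard (i + 1) rest

def gwt_invariant_py (order : List Int) (has_sim_traces : Bool) (has_api_context : Bool) (has_verifiers : Bool) (has_tla_spec : Bool) : Bool :=
  if has_sim_traces && !(decide (1 ≤ order.length) && (PySem.List.pyGet? order 0 == some 1)) then false
  else if has_api_context && !(pvLoop2 has_sim_traces 0 order) then false
  else if has_verifiers && !(pvLoopFind order 3 2 has_api_context 0 order) then false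
  else if has_tla_spec && !(pvLoopFind order 4 3 has_verifiers 0 order) then false
  else pvLoopFind order 5 4 has_tla_spec 0 order

-- ===== PORT B =====
-- one pass; state = (seen2, seen3, seen4) and (f2, f3, f4, f5); i is the enumerate index
def pvAltLoop (sim api ver tla : Bool) : Nat → Bool × Bool × Bool → Bool × Bool × Bool × Bool → List Int → Bool × Bool × Bool × Bool
  | _, _, fs, [] => fs
  | i, (s2, s3, s4), (f2, f3, f4, f5), r :: rest =>
      pvAltLoop sim api ver tla (i + 1)
        (s2 || r == 2, s3 || r == 3, s4 || r == 4)
        (f2 || (r == 2 && (!sim || decide (0 < i))),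
         f3 || (r == 3 && (!api || s2)),
         f4 || (r == 4 && (!ver || s3)),
         f5 || (r == 5 && (!tla || s4))) rest

def gwt_invariant_py_alt (order : List Int) (has_sim_traces : Bool) (has_api_context : Bool) (has_verifiers : Bool) (has_tla_spec : Bool) : Bool :=
  if has_sim_traces && !(match order with | [] => false | h :: _ => h == 1) then false
  else
    match pvAltLoop has_sim_traces has_api_context has_verifiers has_tla_spec 0
            (false, false, false) (false, false, false, false) order with
    | (f2, f3, f4, f5) =>
        (!has_api_context || f2) && (!has_verifiers || f3) && (!has_tla_spec || f4) && f5

-- ===== PRECONDITION & SPEC =====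
def Spec_gwt_invariant_py (order : List Int) (has_sim_traces : Bool) (has_api_context : Bool) (has_verifiers : Bool) (has_tla_spec : Bool) (out : Bool) : Prop := out = gwt_invariant_py_alt order has_sim_traces has_api_context has_verifiers has_tla_spec
instance (order : List Int) (has_sim_traces : Bool) (has_api_context : Bool) (has_verifiers : Bool) (has_tla_spec : Bool) (out : Bool) : Decidable (Spec_gwt_invariant_py order has_sim_traces has_api_context has_verifiers has_tla_spec out) := by unfold Spec_gwt_invariant_py; infer_instance

-- ===== CLAIM (what is proved, stated in full; the proofs are below) =====
def Claim_equal_gwt_invariant_py : Prop := ∀ (order : List Int) (has_sim_traces : Bool) (has_api_context : Bool) (has_verifiers : Bool) (has_tla_spec : Bool), Dom_gwt_invariant_py order has_sim_traces has_api_context has_verifiers has_tla_spec → Spec_gwt_invariant_py order has_sim_traces has_api_context has_verifiers has_tla_spec (gwt_invariant_py order has_sim_traces has_api_context has_verifiers has_tla_spec)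

-- ===== LEMMAS AND PROOFS =====

lemma pvAnyEq_succ (full : List Int) (i : Nat) (r : Int) (rest : List Int)
    (h : full.drop i = r :: rest) (v : Int) :
    pvAnyEq full (i + 1) v = (pvAnyEq full i v || (r == v)) := by
  have hi : full[i]? = some r := by
    rw [← List.head?_drop, h]; rfl
  have ht : full.take (i + 1) = full.take i ++ [r] := by
    rw [List.take_add_one, hi]; rfl
  simp [pvAnyEq, ht]

lemma pvAltLoop_eq (sim api ver tla : Bool) (full : List Int) :
    ∀ (rest : List Int) (i : Nat) (f2 f3 f4 f5 : Bool), full.drop i = rest →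
    pvAltLoop sim api ver tla i (pvAnyEq full i 2, pvAnyEq full i 3, pvAnyEq full i 4)
        (f2, f3, f4, f5) rest
      = (f2 || pvLoop2 sim i rest,
         f3 || pvLoopFind full 3 2 api i rest,
         f4 || pvLoopFind full 4 3 ver i rest,
         f5 || pvLoopFind full 5 4 tla i rest) := by
  intro rest
  induction rest with
  | nil => intro i f2 f3 f4 f5 _; simp [pvAltLoop, pvLoop2, pvLoopFind]
  | cons r rest ih =>
      intro i f2 f3 f4 f5 h
      have hdrop : full.drop (i + 1) = rest := by
        rw [← List.tail_drop, h]; rfl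
      have h2 := pvAnyEq_succ full i r rest h 2
      have h3 := pvAnyEq_succ full i r rest h 3
      have h4 := pvAnyEq_succ full i r rest h 4
      rw [pvAltLoop, ← h2, ← h3, ← h4, ih (i + 1) _ _ _ _ hdrop]
      rw [pvLoop2, pvLoopFind, pvLoopFind, pvLoopFind]
      cases hc2 : (r == 2 && (!sim || decide (0 < i))) <;>
      cases hc3 : (r == 3 && (!api || pvAnyEq full i 2)) <;>
      cases hc4 : (r == 4 && (!ver || pvAnyEq full i 3)) <;>
      cases hc5 : (r == 5 && (!tla || pvAnyEq full i 4)) <;>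
        simp

lemma pvHead_eq (order : List Int) :
    (decide (1 ≤ order.length) && (PySem.List.pyGet? order 0 == some 1))
      = (match order with | [] => false | h :: _ => h == 1) := by
  cases order with
  | nil => simp [PySem.List.pyGet?]
  | cons h t => simp

-- ===== VERDICT (by name: the statement is the Claim_ definition above) =====
theorem gwt_invariant_py_spec : Claim_equal_gwt_invariant_py := by
  intro order sim api ver tla _
  unfold Spec_gwt_invariant_py gwt_invariant_py gwt_invariant_py_alt
  rw [← pvHead_eq]
  have hmain := pvAltLoop_eq sim api ver tla order order 0 false false false false rfl
  have h0 : ∀ v : Int, pvAnyEq order 0 v = false := by intro v; simp [pvAnyEq]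
  rw [h0, h0, h0] at hmain
  rw [hmain]
  cases sim <;> cases api <;> cases ver <;> cases tla <;>
  cases hL1 : (decide (1 ≤ order.length) && (PySem.List.pyGet? order 0 == some 1)) <;>
  cases hL2 : pvLoop2 false 0 order <;> cases hL2' : pvLoop2 true 0 order <;>
    simp_all [Bool.and_assoc]
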